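-- pv_equiv track=rewrite | github.com/Iulian-Tudor/AI | Sudoku (Lab 2 si 3)/main.py | este_starea_finala
-- ===== SOURCE A (Python) =====
-- def este_starea_finala(puzzle):
--
--     puzzle_flattened = [item for sublist in puzzle for item in sublist]
--
--     # Este 0 primul element si restul listei este sortat?
--     if puzzle_flattened[0] == 0 and puzzle_flattened[1:] == sorted(puzzle_flattened[1:]):
--         return True
--
--     # Este 0 ultimul element si restul listei este sortat?
--     if puzzle_flattened[-1] == 0 and puzzle_flattened[:-1] == sorted(puzzle_flattened[:-1]):
--         return True
--
--     # take 0 out of the list and check if it's sorted (the rest of the list)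
--     puzzle_without_0 = [i for i in puzzle_flattened if i != 0]
--     if puzzle_without_0 == sorted(puzzle_without_0):
--         return True
--
--     return False
-- ===== SOURCE B (Python) =====
-- def este_starea_finala(puzzle):
--     # One linear pass: ignoring zeros, every kept value must be >= the previous kept value.
--     prev = None
--     for row in puzzle:
--         for item in row:
--             if item != 0:
--                 if prev is not None and item < prev:
--                     return False
--                 prev = item
--     return True
-- ===== Notes on version B (the rewrite author's own statement) =====
-- stated objective: faster
-- what changed: A flattens the grid, indexes first/last, and sorts up to three sublists to compare against; B does one linear pass over the rows that skips zeros and checks each kept value is >= the previous kept value; Pre_ excludes only puzzles with no cells at all, where A raises IndexError.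
import Mathlib
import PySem

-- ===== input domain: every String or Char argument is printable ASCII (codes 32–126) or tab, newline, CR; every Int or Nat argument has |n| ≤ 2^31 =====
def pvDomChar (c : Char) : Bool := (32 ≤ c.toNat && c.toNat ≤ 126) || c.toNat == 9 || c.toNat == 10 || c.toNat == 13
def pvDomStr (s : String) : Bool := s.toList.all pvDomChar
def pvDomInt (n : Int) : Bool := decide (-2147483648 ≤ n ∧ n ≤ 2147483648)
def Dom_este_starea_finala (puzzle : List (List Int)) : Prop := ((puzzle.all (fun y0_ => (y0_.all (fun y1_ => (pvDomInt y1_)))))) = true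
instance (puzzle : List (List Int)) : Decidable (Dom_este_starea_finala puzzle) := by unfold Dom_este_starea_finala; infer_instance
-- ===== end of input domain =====

-- B replaces 'flatten, index, slice and sort three times' by one linear scan that checks,
-- ignoring zeros, that each kept value is ≥ the previous kept one (objective: faster, O(n) vs O(n log n)).

-- ===== PORT A =====
def este_starea_finala (puzzle : List (List Int)) : Bool :=
  let pf := puzzle.flatMap (fun sublist => sublist)        -- [item for sublist in puzzle for item in sublist]
  match PySem.List.pyGet? pf 0, PySem.List.pyGet? pf (-1) with   -- puzzle_flattened[0] / [-1]; none = IndexError (outside Pre_)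
  | some first, some last =>
      if first = 0 ∧ PySem.List.slice pf (some 1) none =
          PySem.List.sorted (PySem.List.slice pf (some 1) none) (fun x => x) false then true
      else if last = 0 ∧ PySem.List.slice pf none (some (-1)) =
          PySem.List.sorted (PySem.List.slice pf none (some (-1))) (fun x => x) false then true
      else
        let w := pf.filter (fun i => i != 0)
        if w = PySem.List.sorted w (fun x => x) false then true
        else false
  | _, _ => false

-- ===== PORT B =====
-- inner loop: scan one row, state = last kept (non-zero) value; returns (still ok, new state)
def pvScanRow : Option Int → List Int → Bool × Option Int
  | prev, [] => (true, prev)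
  | prev, item :: rest =>
    if item != 0 then
      match prev with
      | some p => if item < p then (false, prev) else pvScanRow (some item) rest
      | none => pvScanRow (some item) rest
    else pvScanRow prev rest

-- outer loop over rows
def pvScanRows : Option Int → List (List Int) → Bool
  | _, [] => true
  | prev, row :: rows =>
    match pvScanRow prev row with
    | (false, _) => false
    | (true, p) => pvScanRows p rows

def este_starea_finala_alt (puzzle : List (List Int)) : Bool :=
  pvScanRows none puzzle

-- ===== PRECONDITION & SPEC =====
-- Pre_ excludes exactly the puzzles whose flattening is empty: there A raises IndexError on puzzle_flattened[0].
def Pre_este_starea_finala (puzzle : List (List Int)) : Prop :=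
  puzzle.flatMap (fun sublist => sublist) ≠ []
instance (puzzle : List (List Int)) : Decidable (Pre_este_starea_finala puzzle) := by
  unfold Pre_este_starea_finala; infer_instance

def pvWitness_este_starea_finala : List (List Int) := [[0, 1], [2, 0]]

def Spec_este_starea_finala (puzzle : List (List Int)) (out : Bool) : Prop := out = este_starea_finala_alt puzzle
instance (puzzle : List (List Int)) (out : Bool) : Decidable (Spec_este_starea_finala puzzle out) := by unfold Spec_este_starea_finala; infer_instance

-- ===== CLAIM (what is proved, stated in full; the proofs are below) =====
def Claim_equal_este_starea_finala : Prop := ∀ (puzzle : List (List Int)), Dom_este_starea_finala puzzle → Pre_este_starea_finala puzzle → Spec_este_starea_finala puzzle (este_starea_finala puzzle)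


-- ===== LEMMAS AND PROOFS =====

-- "l == sorted(l)" says exactly that l is non-decreasing
theorem pv_sorted_eq_iff (l : List Int) :
    l = PySem.List.sorted l (fun x => x) false ↔ l.Pairwise (· ≤ ·) := by
  constructor
  · intro h
    have := PySem.List.sorted_pairwise l (fun x => x)
    rw [← h] at this
    simpa using this
  · intro h
    exact (PySem.List.sorted_eq_self_of_pairwise l (fun x => x) (by simpa using h)).symm

-- the scan skips zeros: scanning l is scanning l with zeros removed
theorem pvScanRow_filter (l : List Int) :
    ∀ prev, pvScanRow prev l = pvScanRow prev (l.filter (fun i => i != 0)) := by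
  induction l with
  | nil => intro prev; rfl
  | cons x xs ih =>
    intro prev
    by_cases hx : x = 0
    · subst hx
      simpa [pvScanRow, List.filter_cons] using ih prev
    · have hx' : (x != 0) = true := by simpa using hx
      simp only [List.filter_cons, hx', if_true]
      cases prev with
      | none => simp [pvScanRow, hx', ih (some x)]
      | some p =>
        by_cases hlt : x < p
        · simp [pvScanRow, hx', hlt]
        · simp [pvScanRow, hx', hlt, ih (some x)]

-- on a zero-free list the scan decides the chain condition (prepending the carried value)
theorem pvScanRow_fst (l : List Int) (hl : ∀ x ∈ l, x ≠ 0) :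
    ∀ prev, (pvScanRow prev l).1 = decide (List.IsChain (· ≤ ·) (prev.toList ++ l)) := by
  induction l with
  | nil => intro prev; cases prev <;> simp [pvScanRow]
  | cons x xs ih =>
    intro prev
    have hx' : (x != 0) = true := by simpa using hl x (by simp)
    have ih' := ih (fun y hy => hl y (by simp [hy]))
    cases prev with
    | none =>
      simp [pvScanRow, hx', ih' (some x)]
    | some p =>
      by_cases hlt : x < p
      · have hpx : ¬ (p ≤ x) := by omega
        simp [pvScanRow, hx', hlt, List.isChain_cons_cons, hpx]
      · have hpx : p ≤ x := by omega
        simp [pvScanRow, hx', hlt, ih' (some x), List.isChain_cons_cons, hpx]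

-- scanning a concatenation = scan the first part, continue if it succeeded
theorem pvScanRow_append (a b : List Int) :
    ∀ prev, pvScanRow prev (a ++ b) =
      (if (pvScanRow prev a).1 then pvScanRow (pvScanRow prev a).2 b else pvScanRow prev a) := by
  induction a with
  | nil => intro prev; simp [pvScanRow]
  | cons x xs ih =>
    intro prev
    by_cases hx : (x != 0) = true
    · cases prev with
      | none => simpa [pvScanRow, hx] using ih (some x)
      | some p =>
        by_cases hlt : x < p
        · simp [pvScanRow, hx, hlt]
        · simpa [pvScanRow, hx, hlt] using ih (some x)
    · simpa [pvScanRow, hx] using ih prev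

-- the nested row-by-row scan equals the scan of the flattening
theorem pvScanRows_flat (rows : List (List Int)) :
    ∀ prev, pvScanRows prev rows = (pvScanRow prev (rows.flatMap (fun sublist => sublist))).1 := by
  induction rows with
  | nil => intro prev; simp [pvScanRows, pvScanRow]
  | cons r rs ih =>
    intro prev
    rw [List.flatMap_cons, pvScanRow_append]
    rcases h : pvScanRow prev r with ⟨ok, p⟩
    cases ok
    · simp [pvScanRows, h]
    · simp [pvScanRows, h, ih p]

-- B computes: the zero-free part of the flattening is non-decreasing
theorem pv_alt_char (puzzle : List (List Int)) :
    este_starea_finala_alt puzzle =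
      decide (((puzzle.flatMap (fun sublist => sublist)).filter (fun i => i != 0)).Pairwise (· ≤ ·)) := by
  have hfil : ∀ x ∈ (puzzle.flatMap (fun sublist => sublist)).filter (fun i => i != 0), x ≠ 0 := by
    intro x hx
    simpa using (List.mem_filter.mp hx).2
  rw [este_starea_finala_alt, pvScanRows_flat, pvScanRow_filter,
      pvScanRow_fst _ hfil none]
  simp [List.isChain_iff_pairwise]

-- ===== VERDICT (by name: the statement is the Claim_ definition above) =====
theorem este_starea_finala_spec : Claim_equal_este_starea_finala := by
  intro puzzle _ hpre
  unfold Spec_este_starea_finala Pre_este_starea_finala at *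
  rw [pv_alt_char]
  unfold este_starea_finala
  set L := puzzle.flatMap (fun sublist => sublist) with hL
  rcases L with _ | ⟨a, t⟩
  · exact absurd rfl hpre
  · have hne : a :: t ≠ [] := List.cons_ne_nil a t
    dsimp only
    rw [PySem.List.pyGet?_zero_cons, PySem.List.pyGet?_neg_one,
        List.getLast?_eq_some_getLast hne, PySem.List.slice_from_one, PySem.List.slice_to_neg_one]
    simp only [List.tail_cons]
    by_cases hw : ((a :: t).filter (fun i => i != 0)).Pairwise (· ≤ ·)
    · split_ifs with h1 h2 h3 <;> simp [hw]
      exact h3 ((pv_sorted_eq_iff _).mpr hw)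
    · have h3 : ¬ ((a :: t).filter (fun i => i != 0) =
          PySem.List.sorted ((a :: t).filter (fun i => i != 0)) (fun x => x) false) :=
        fun h => hw ((pv_sorted_eq_iff _).mp h)
      have h1 : ¬ (a = 0 ∧ t = PySem.List.sorted t (fun x => x) false) := by
        rintro ⟨ha, hs⟩
        subst ha
        apply hw
        have : ((0 : Int) != 0) = false := by decide
        rw [List.filter_cons, this]
        simp only [if_neg Bool.false_ne_true]
        exact ((pv_sorted_eq_iff t).mp hs).filter _
      have h2 : ¬ ((a :: t).getLast hne = 0 ∧ (a :: t).dropLast =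
          PySem.List.sorted ((a :: t).dropLast) (fun x => x) false) := by
        rintro ⟨hg, hs⟩
        apply hw
        have hsplit := List.dropLast_append_getLast hne
        rw [← hsplit, List.filter_append, hg]
        have : ((0 : Int) != 0) = false := by decide
        simp only [List.filter_cons, this, if_neg Bool.false_ne_true, List.filter_nil,
          List.append_nil]
        exact ((pv_sorted_eq_iff _).mp hs).filter _
      simp [h1, h2, h3, hw]
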